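-- pv_equiv track=rewrite | github.com/luuvish/py-hevc | src/Lib/TLibCommon/TComDataCU.py | xGetComponentBits
-- ===== SOURCE A (Python) =====
-- def xGetComponentBits(iVal):
--     uiLength = 1
--     uiTemp = (-iVal<<1)+1 if iVal <= 0 else iVal<<1
--
--     assert(uiTemp)
--
--     while 1 != uiTemp:
--         uiTemp >>= 1
--         uiLength += 2
--
--     return uiLength
-- ===== SOURCE B (Python) =====
-- def xGetComponentBits(iVal):
--     uiTemp = (-iVal << 1) + 1 if iVal <= 0 else iVal << 1
--     assert(uiTemp)
--     return 2 * (uiTemp.bit_length() - 1) + 1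
-- ===== Notes on version B (the rewrite author's own statement) =====
-- stated objective: idiomatic
-- what changed: Replaced the right-shift counting loop with a closed-form answer 2*(uiTemp.bit_length()-1)+1 from a single bit_length query.
import Mathlib
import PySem

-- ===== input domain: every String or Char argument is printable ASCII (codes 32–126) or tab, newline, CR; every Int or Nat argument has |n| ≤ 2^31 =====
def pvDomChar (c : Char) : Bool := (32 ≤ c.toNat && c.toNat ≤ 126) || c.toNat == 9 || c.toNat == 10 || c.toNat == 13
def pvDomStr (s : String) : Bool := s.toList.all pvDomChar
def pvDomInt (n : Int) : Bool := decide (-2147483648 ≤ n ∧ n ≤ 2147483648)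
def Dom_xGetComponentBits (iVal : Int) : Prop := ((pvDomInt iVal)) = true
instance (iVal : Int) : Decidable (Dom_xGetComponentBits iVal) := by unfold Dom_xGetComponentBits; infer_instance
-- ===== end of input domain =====

-- ===== PORT A =====
-- B replaces the right-shift counting loop by the closed form 2*(bit_length-1)+1 (idiomatic).
-- A's while loop: shift uiTemp right, adding 2 to uiLength, until uiTemp = 1.
def xLoopA : Nat → Int → Int
  | 0, uiLength => uiLength        -- unreachable: uiTemp ≥ 1 always
  | 1, uiLength => uiLength
  | (t+2), uiLength => xLoopA ((t+2)/2) (uiLength+2)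

def xGetComponentBits (iVal : Int) : Int :=
  let uiTemp : Int := if iVal ≤ 0 then (-iVal) <<< (1:Nat) + 1 else iVal <<< (1:Nat)
  -- assert(uiTemp) always passes since uiTemp ≥ 1
  xLoopA uiTemp.toNat 1

-- ===== PORT B =====
def xGetComponentBits_alt (iVal : Int) : Int :=
  let uiTemp : Int := if iVal ≤ 0 then (-iVal) <<< (1:Nat) + 1 else iVal <<< (1:Nat)
  -- bit_length of the positive uiTemp = Nat.log2 + 1
  2 * ((Nat.log2 uiTemp.toNat : Int) + 1 - 1) + 1

-- ===== PRECONDITION & SPEC =====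
def Spec_xGetComponentBits (iVal : Int) (out : Int) : Prop := out = xGetComponentBits_alt iVal
instance (iVal : Int) (out : Int) : Decidable (Spec_xGetComponentBits iVal out) := by unfold Spec_xGetComponentBits; infer_instance

-- ===== CLAIM (what is proved, stated in full; the proofs are below) =====
def Claim_equal_xGetComponentBits : Prop := ∀ (iVal : Int), Dom_xGetComponentBits iVal → Spec_xGetComponentBits iVal (xGetComponentBits iVal)

-- ===== LEMMAS AND PROOFS =====
theorem xLoopA_eq (t : Nat) (ht : 1 ≤ t) : ∀ len : Int, xLoopA t len = len + 2 * (Nat.log2 t : Int) := by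
  induction t using Nat.strong_induction_on with
  | _ t ih =>
    match t, ht with
    | 1, _ =>
      intro len; simp [xLoopA, Nat.log2]
    | (t+2), _ =>
      intro len
      rw [xLoopA]
      rw [ih ((t+2)/2) (by omega) (by omega)]
      have hs : (t + 2) >>> 1 = (t + 2) / 2 := Nat.shiftRight_one _
      have hl : Nat.log2 (t + 2) = Nat.log2 ((t + 2) / 2) + 1 := by
        rw [Nat.log2_eq_succ_log2_shiftRight (by rw [hs]; omega), hs]
      rw [hl]
      push_cast
      ring

-- ===== VERDICT (by name: the statement is the Claim_ definition above) =====
theorem xGetComponentBits_spec : Claim_equal_xGetComponentBits := by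
  unfold Claim_equal_xGetComponentBits
  intro iVal _
  unfold Spec_xGetComponentBits xGetComponentBits xGetComponentBits_alt
  set u : Int := if iVal ≤ 0 then (-iVal) <<< (1:Nat) + 1 else iVal <<< (1:Nat) with hu
  have h1 : 1 ≤ u.toNat := by
    have : 1 ≤ u := by
      rw [hu]; split_ifs with h <;> rw [Int.shiftLeft_eq] <;> nlinarith
    omega
  rw [xLoopA_eq u.toNat h1]
  ring
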